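-- pv_equiv track=rewrite | github.com/thomasniebler/semantics-pathtools | src/utils/wikispeedia.py | remove_backclicks
-- ===== SOURCE A (Python) =====
-- def remove_backclicks(path):
--     """
--     This only applies to paths in the WikiSpeedia dataset.
--     :param path:
--     :return:
--     """
--     tmp_path = reversed(path)
--     result_path = []
--     skip = 0
--     for elem in tmp_path:
--         if elem == '<':
--             skip += 1
--             continue
--         if skip > 0:
--             skip -= 1
--             continue
--         result_path.append(elem)
--     return list(reversed(result_path))
-- ===== SOURCE B (Python) =====
-- def remove_backclicks(path):
--     """
--     This only applies to paths in the WikiSpeedia dataset.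
--     :param path:
--     :return:
--     """
--     result = []
--     for elem in path:
--         if elem == '<':
--             if result:
--                 result.pop()
--         else:
--             result.append(elem)
--     return result
-- ===== Notes on version B (the rewrite author's own statement) =====
-- stated objective: simpler
-- what changed: Replaces A's reversed traversal with a skip counter plus a final reversal by a single forward pass maintaining the result as a stack: '<' pops the last kept element (if any), anything else is pushed; no reversal needed.
import Mathlib
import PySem

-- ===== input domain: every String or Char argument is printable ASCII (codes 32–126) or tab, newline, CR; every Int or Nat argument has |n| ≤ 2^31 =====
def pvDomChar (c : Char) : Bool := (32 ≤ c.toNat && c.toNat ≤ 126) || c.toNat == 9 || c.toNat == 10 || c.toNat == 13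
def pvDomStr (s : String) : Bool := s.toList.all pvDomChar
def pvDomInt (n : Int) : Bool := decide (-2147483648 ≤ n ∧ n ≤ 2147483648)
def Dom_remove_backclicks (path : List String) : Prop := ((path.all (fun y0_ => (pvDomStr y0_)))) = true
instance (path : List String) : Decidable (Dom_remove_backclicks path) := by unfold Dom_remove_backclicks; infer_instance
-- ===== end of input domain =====

-- B removes backclicks in one forward pass with the result list used as a stack,
-- instead of A's reversed traversal with a skip counter plus a final reversal (objective: simpler).

-- ===== PORT A =====
-- A's loop body over the reversed path, state = (result_path, skip)
def aStep (acc : List String × Int) (elem : String) : List String × Int :=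
  if elem = "<" then (acc.1, acc.2 + 1)
  else if acc.2 > 0 then (acc.1, acc.2 - 1)
  else (acc.1 ++ [elem], acc.2)

def remove_backclicks (path : List String) : List String :=
  (path.reverse.foldl aStep ([], 0)).1.reverse

-- ===== PORT B =====
-- B's loop body: '<' pops the last element if the result is non-empty, else push
def bStep (res : List String) (elem : String) : List String :=
  if elem = "<" then (if res.isEmpty then res else res.dropLast)
  else res ++ [elem]

def remove_backclicks_alt (path : List String) : List String :=
  path.foldl bStep []

-- ===== PRECONDITION & SPEC =====
def Spec_remove_backclicks (path : List String) (out : List String) : Prop := out = remove_backclicks_alt path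
instance (path : List String) (out : List String) : Decidable (Spec_remove_backclicks path out) := by unfold Spec_remove_backclicks; infer_instance

-- ===== CLAIM (what is proved, stated in full; the proofs are below) =====
def Claim_equal_remove_backclicks : Prop := ∀ (path : List String), Dom_remove_backclicks path → Spec_remove_backclicks path (remove_backclicks path)

-- ===== LEMMAS AND PROOFS =====

-- drop the last element n times
def popN : Nat → List String → List String
  | 0, s => s
  | n + 1, s => popN n s.dropLast

theorem popN_nil : ∀ n, popN n ([] : List String) = [] := by
  intro n; induction n with
  | zero => rfl
  | succ n ih => simpa [popN] using ih

theorem bStep_eq_dropLast (res : List String) : bStep res "<" = res.dropLast := by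
  cases res <;> simp [bStep]

theorem aStep_skip_nonneg : ∀ (l : List String) (acc : List String × Int),
    0 ≤ acc.2 → 0 ≤ (l.foldl aStep acc).2 := by
  intro l
  induction l with
  | nil => intro acc h; simpa using h
  | cons e t ih =>
      intro acc h
      simp only [List.foldl_cons]
      apply ih
      unfold aStep
      split_ifs <;> simp <;> omega

-- main invariant: a forward pass with initial stack s equals
-- "pop s as many times as A's leftover skip, then append A's (reversed) result"
theorem inv : ∀ (path : List String) (s : List String),
    path.foldl bStep s =
      popN (path.reverse.foldl aStep ([], 0)).2.toNat s
        ++ (path.reverse.foldl aStep ([], 0)).1.reverse := by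
  intro path
  induction path with
  | nil => intro s; simp [popN]
  | cons e t ih =>
      intro s
      have hrev : (e :: t).reverse.foldl aStep (([] : List String), (0 : Int))
          = aStep (t.reverse.foldl aStep ([], 0)) e := by
        simp [List.reverse_cons, List.foldl_append]
      have hnn : 0 ≤ (t.reverse.foldl aStep (([] : List String), (0 : Int))).2 :=
        aStep_skip_nonneg _ _ (by norm_num)
      rw [List.foldl_cons, ih (bStep s e), hrev]
      set f := t.reverse.foldl aStep (([] : List String), (0 : Int)) with hf
      by_cases he : e = "<"
      · subst he
        rw [bStep_eq_dropLast]
        have h1 : (f.2 + 1).toNat = f.2.toNat + 1 := by omega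
        simp [aStep, h1, popN]
      · by_cases hk : f.2 > 0
        · have hm : f.2.toNat = (f.2 - 1).toNat + 1 := by omega
          simp only [aStep, he, hk, if_true]
          rw [bStep, if_neg he, hm]
          simp [popN]
        · have h0 : f.2 = 0 := by omega
          simp [aStep, he, bStep, h0, popN]

-- ===== VERDICT (by name: the statement is the Claim_ definition above) =====
theorem remove_backclicks_spec : Claim_equal_remove_backclicks := by
  intro path _
  unfold Spec_remove_backclicks remove_backclicks remove_backclicks_alt
  have := inv path []
  simpa [popN_nil] using this.symm
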